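-- pv_equiv track=rewrite | github.com/ViniciusCastellani/Teste-estagio-intuitivecare-2026 | teste1_api_ans/src/ans_download.py | extrair_ano_trimestre
-- ===== SOURCE A (Python) =====
-- def extrair_ano_trimestre(nome_arquivo, ano_padrao=None):
--     nome = nome_arquivo.lower().replace(".zip", "")
--     partes = nome.replace("-", "_").replace(".", "_").split("_")
--
--     ano = None
--     trimestre = None
--
--     for i, parte in enumerate(partes):
--         # Ano
--         if parte.isnumeric() and len(parte) == 4:
--             ano = parte
--
--         # Formato: 1t, 2t
--         if len(parte) == 2 and parte[0].isdigit() and parte[1] == "t":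
--             trimestre = parte[0]
--
--         # Formato: 1t2023
--         if parte.isnumeric() is False and "t" in parte:
--             idx = parte.find("t")
--             if idx == 1 and parte[0].isdigit():
--                 trimestre = parte[0]
--                 resto = parte[2:]
--                 if resto.isnumeric() and len(resto) == 4:
--                     ano = resto
--
--         # Formato: 3_trimestre
--         if parte.isnumeric() and i + 1 < len(partes):
--             if partes[i + 1].startswith("trimestre"):
--                 trimestre = parte
--
--     if ano is None and ano_padrao is not None:
--         ano = str(ano_padrao)
--
--     return ano, trimestre
-- ===== SOURCE B (Python) =====
-- def extrair_ano_trimestre(nome_arquivo, ano_padrao=None):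
--     # Same normalization as A, then one dedicated reverse pass per field
--     # (first match from the right == A's last-write-wins), instead of one
--     # forward loop threading two mutable variables through four conditionals.
--     nome = nome_arquivo.lower().replace(".zip", "")
--     partes = nome.replace("-", "_").replace(".", "_").split("_")
--     n = len(partes)
--
--     ano = next(
--         (p if p.isnumeric() else p[2:]
--          for p in reversed(partes)
--          if (p.isnumeric() and len(p) == 4)
--          or (not p.isnumeric() and "t" in p and p.find("t") == 1
--              and p[0].isdigit() and p[2:].isnumeric() and len(p[2:]) == 4)),
--         None)
--
--     trimestre = next(
--         (p if p.isnumeric() else p[0]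
--          for i, p in reversed(list(enumerate(partes)))
--          if (len(p) == 2 and p[0].isdigit() and p[1] == "t")
--          or (not p.isnumeric() and "t" in p and p.find("t") == 1 and p[0].isdigit())
--          or (p.isnumeric() and i + 1 < n and partes[i + 1].startswith("trimestre"))),
--         None)
--
--     if ano is None and ano_padrao is not None:
--         ano = str(ano_padrao)
--     return ano, trimestre
-- ===== Notes on version B (the rewrite author's own statement) =====
-- stated objective: idiomatic
-- what changed: A threads two mutable variables (ano, trimestre) through one forward loop with four sequential conditionals; B does one dedicated reverse scan per field, taking the first match from the right (next(...) over reversed tokens), which makes the last-write-wins rule explicit and each field's extraction independent.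
import Mathlib
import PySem

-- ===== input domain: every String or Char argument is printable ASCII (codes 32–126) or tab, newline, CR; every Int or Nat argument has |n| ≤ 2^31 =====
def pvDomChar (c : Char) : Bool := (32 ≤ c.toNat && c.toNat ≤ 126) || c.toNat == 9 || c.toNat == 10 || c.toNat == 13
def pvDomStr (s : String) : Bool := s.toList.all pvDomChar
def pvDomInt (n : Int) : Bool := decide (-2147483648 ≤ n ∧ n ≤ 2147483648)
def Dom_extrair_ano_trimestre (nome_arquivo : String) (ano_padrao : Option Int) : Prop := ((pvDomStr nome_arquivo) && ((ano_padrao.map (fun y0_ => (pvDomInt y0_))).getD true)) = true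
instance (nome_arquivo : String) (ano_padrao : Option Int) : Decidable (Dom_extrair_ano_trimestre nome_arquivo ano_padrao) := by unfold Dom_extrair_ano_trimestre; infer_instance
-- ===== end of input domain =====

-- B replaces A's single forward loop threading two mutable variables through four
-- conditionals by one dedicated reverse-scan ("first match from the right") per field;
-- same return value, objective: idiomatic (not claimed faster).

-- ===== PORT A =====
-- shared normalization (identical lines in both Pythons):
-- nome_arquivo.lower().replace(".zip","").replace("-","_").replace(".","_").split("_")
-- split("_") has a non-empty separator, so Str.split? is always `some`; .getD [] is exact.
def pvPartes (s : String) : List String :=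
  (PySem.Str.split?
    (PySem.Str.replace (PySem.Str.replace (PySem.Str.replace (PySem.Str.lower s) ".zip" "") "-" "_") "." "_")
    "_").getD []

-- loop body of A, state (ano, trimestre); Python str.isnumeric()/str.isdigit() are both
-- PySem.Str.strIsdigit / Chars.isdigit, exact on the ASCII domain; parte[0]/parte[1] are
-- read only under guards that make them in range, so getD / take 1 is exact there.
def pvStepA (partes : List String) (s : Option String × Option String) (ip : Int × String) :
    Option String × Option String :=
  let i := ip.1
  let parte := ip.2
  -- if parte.isnumeric() and len(parte) == 4: ano = parte
  let s := if PySem.Str.strIsdigit parte && (PySem.Str.len parte == 4) then (some parte, s.2) else s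
  -- if len(parte) == 2 and parte[0].isdigit() and parte[1] == "t": trimestre = parte[0]
  let s := if (PySem.Str.len parte == 2) && PySem.Chars.isdigit (parte.toList.getD 0 ' ')
              && (parte.toList.getD 1 ' ' == 't')
           then (s.1, some (String.ofList (parte.toList.take 1))) else s
  -- if parte.isnumeric() is False and "t" in parte: …
  let s := if !PySem.Str.strIsdigit parte && PySem.Str.isIn "t" parte then
             let idx := PySem.Str.find parte "t"
             if idx == 1 && PySem.Chars.isdigit (parte.toList.getD 0 ' ') then
               let s : Option String × Option String := (s.1, some (String.ofList (parte.toList.take 1)))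
               let resto := PySem.Str.slice parte (some 2) none
               if PySem.Str.strIsdigit resto && (PySem.Str.len resto == 4) then (some resto, s.2) else s
             else s
           else s
  -- if parte.isnumeric() and i + 1 < len(partes): if partes[i+1].startswith("trimestre"): trimestre = parte
  if PySem.Str.strIsdigit parte && (i + 1 < (partes.length : Int)) then
    if PySem.Str.startswith (PySem.List.pyGetD partes (i + 1) "") "trimestre" then (s.1, some parte) else s
  else s

-- if ano is None and ano_padrao is not None: ano = str(ano_padrao)  (identical line in both Pythons)
def pvFallback (ano : Option String) (ano_padrao : Option Int) : Option String :=
  match ano, ano_padrao with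
  | none, some v => some (PySem.Int.toStr v)
  | a, _ => a

def extrair_ano_trimestre (nome_arquivo : String) (ano_padrao : Option Int) :
    Option String × Option String :=
  let partes := pvPartes nome_arquivo
  let st := (PySem.List.enumerate partes).foldl (pvStepA partes) (none, none)
  (pvFallback st.1 ano_padrao, st.2)

-- ===== PORT B =====
-- generator body of B's `ano` pass (condition and value of one token)
def pvAnoTok (p : String) : Option String :=
  if (PySem.Str.strIsdigit p && (PySem.Str.len p == 4))
     || (!PySem.Str.strIsdigit p && PySem.Str.isIn "t" p && (PySem.Str.find p "t" == 1)
         && PySem.Chars.isdigit (p.toList.getD 0 ' ')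
         && PySem.Str.strIsdigit (PySem.Str.slice p (some 2) none)
         && (PySem.Str.len (PySem.Str.slice p (some 2) none) == 4))
  then some (if PySem.Str.strIsdigit p then p else PySem.Str.slice p (some 2) none)
  else none

-- generator body of B's `trimestre` pass
def pvTriTok (partes : List String) (ip : Int × String) : Option String :=
  let i := ip.1
  let p := ip.2
  if ((PySem.Str.len p == 2) && PySem.Chars.isdigit (p.toList.getD 0 ' ') && (p.toList.getD 1 ' ' == 't'))
     || (!PySem.Str.strIsdigit p && PySem.Str.isIn "t" p && (PySem.Str.find p "t" == 1)
         && PySem.Chars.isdigit (p.toList.getD 0 ' '))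
     || (PySem.Str.strIsdigit p && (i + 1 < (partes.length : Int))
         && PySem.Str.startswith (PySem.List.pyGetD partes (i + 1) "") "trimestre")
  then some (if PySem.Str.strIsdigit p then p else String.ofList (p.toList.take 1))
  else none

def extrair_ano_trimestre_alt (nome_arquivo : String) (ano_padrao : Option Int) :
    Option String × Option String :=
  let partes := pvPartes nome_arquivo
  let ano := partes.reverse.findSome? pvAnoTok                                     -- next(… for p in reversed(partes) …)
  let trimestre := ((PySem.List.enumerate partes).reverse).findSome? (pvTriTok partes)  -- next(… for i, p in reversed(list(enumerate(partes))) …)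
  (pvFallback ano ano_padrao, trimestre)

-- ===== PRECONDITION & SPEC =====
def Spec_extrair_ano_trimestre (nome_arquivo : String) (ano_padrao : Option Int) (out : Option String × Option String) : Prop := out = extrair_ano_trimestre_alt nome_arquivo ano_padrao
instance (nome_arquivo : String) (ano_padrao : Option Int) (out : Option String × Option String) : Decidable (Spec_extrair_ano_trimestre nome_arquivo ano_padrao out) := by unfold Spec_extrair_ano_trimestre; infer_instance

-- ===== CLAIM (what is proved, stated in full; the proofs are below) =====
def Claim_equal_extrair_ano_trimestre : Prop := ∀ (nome_arquivo : String) (ano_padrao : Option Int), Dom_extrair_ano_trimestre nome_arquivo ano_padrao → Spec_extrair_ano_trimestre nome_arquivo ano_padrao (extrair_ano_trimestre nome_arquivo ano_padrao)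

-- ===== LEMMAS AND PROOFS =====

-- a 2-character token whose second character is 't' is not numeric
lemma pv_not_dig_of_snd_t (p : String) (h2 : p.toList.length = 2)
    (ht : p.toList.getD 1 ' ' = 't') : PySem.Chars.strIsdigit p.toList = false := by
  obtain ⟨a, b, hab⟩ := List.length_eq_two.mp h2
  simp [hab] at ht
  simp [PySem.Chars.strIsdigit, hab, ht, PySem.Chars.isdigit]

-- a last-write-wins fold is a first-match scan of the reversed list
lemma pvFoldOr {α β : Type} (g : α → Option β) (l : List α) (acc : Option β) :
    l.foldl (fun s x => (g x).or s) acc = (l.reverse.findSome? g).or acc := by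
  induction l generalizing acc with
  | nil => simp
  | cons x t ih => simp [ih, List.findSome?_append, Option.or_assoc]

-- A's loop body acts componentwise: ano and trimestre are each overwritten by
-- exactly the token functions B's two passes use
set_option maxHeartbeats 2000000 in
lemma pvStepA_eq (partes : List String) (s : Option String × Option String) (ip : Int × String) :
    pvStepA partes s ip = ((pvAnoTok ip.2).or s.1, (pvTriTok partes ip).or s.2) := by
  obtain ⟨i, p⟩ := ip
  by_cases hd : PySem.Chars.strIsdigit p.toList = true
  · -- numeric token: the len-2 "digit t" test cannot fire
    have hc2 : ¬((((p.length : Int) = 2 ∧ PySem.Chars.isdigit (p.toList[0]?.getD ' ') = true)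
        ∧ p.toList[1]?.getD ' ' = 't')) := by
      rintro ⟨⟨h0, -⟩, h1⟩
      have hlen : p.toList.length = 2 := by
        have : p.length = 2 := by exact_mod_cast h0
        simpa using this
      have hf := pv_not_dig_of_snd_t p hlen (by simpa [List.getD] using h1)
      rw [hf] at hd
      exact Bool.false_ne_true hd
    by_cases h4 : ((p.length : Int) = 4) <;>
      by_cases hlt : (i + 1 < (partes.length : Int)) <;>
        by_cases hsw : PySem.Chars.startswith (PySem.List.pyGetD partes (i + 1) "").toList
            ['t', 'r', 'i', 'm', 'e', 's', 't', 'r', 'e'] = true <;>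
          · simp only [pvStepA, pvAnoTok, pvTriTok]
            simp [hd, hc2, h4, hlt, hsw]
  · simp only [Bool.not_eq_true] at hd
    by_cases hE : ((((p.length : Int) = 2 ∧ PySem.Chars.isdigit (p.toList[0]?.getD ' ') = true)
          ∧ p.toList[1]?.getD ' ' = 't')) <;>
      by_cases hA : PySem.Chars.isIn ['t'] p.toList = true <;>
        by_cases hB : (PySem.Chars.find p.toList ['t'] = 1) <;>
          by_cases hC : PySem.Chars.isdigit (p.toList[0]?.getD ' ') = true <;>
            by_cases hD : (PySem.Chars.strIsdigit (PySem.List.slice p.toList (some 2) none) = true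
                ∧ ((PySem.List.slice p.toList (some 2) none).length : Int) = 4) <;>
              · simp only [pvStepA, pvAnoTok, pvTriTok]
                simp [hd, hE, hA, hB, hC, hD]
                try (split_ifs <;> simp)

lemma pv_main (nome_arquivo : String) (ano_padrao : Option Int) :
    extrair_ano_trimestre nome_arquivo ano_padrao = extrair_ano_trimestre_alt nome_arquivo ano_padrao := by
  have hfun : pvStepA (pvPartes nome_arquivo)
      = fun (s : Option String × Option String) (e : Int × String) =>
          ((pvAnoTok e.2).or s.1, (pvTriTok (pvPartes nome_arquivo) e).or s.2) := by
    funext s e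
    exact pvStepA_eq _ s e
  have hano : ((PySem.List.enumerate (pvPartes nome_arquivo)).reverse).findSome? (fun e => pvAnoTok e.2)
      = (pvPartes nome_arquivo).reverse.findSome? pvAnoTok := by
    conv_rhs => rw [← PySem.List.map_snd_enumerate (pvPartes nome_arquivo) 0]
    rw [← List.map_reverse, List.findSome?_map]
    rfl
  simp only [extrair_ano_trimestre, extrair_ano_trimestre_alt]
  rw [hfun,
    PySem.List.foldl_prod_mk (fun (a : Option String) (e : Int × String) => (pvAnoTok e.2).or a)
      (fun (b : Option String) (e : Int × String) => (pvTriTok (pvPartes nome_arquivo) e).or b),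
    pvFoldOr (fun (e : Int × String) => pvAnoTok e.2),
    pvFoldOr (pvTriTok (pvPartes nome_arquivo)),
    Option.or_none, Option.or_none, hano]

-- ===== VERDICT (by name: the statement is the Claim_ definition above) =====
theorem extrair_ano_trimestre_spec : Claim_equal_extrair_ano_trimestre := by
  intro nome_arquivo ano_padrao _
  unfold Spec_extrair_ano_trimestre
  exact pv_main nome_arquivo ano_padrao
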